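-- pv_equiv track=rewrite | github.com/harjeet-chahal/AgentXAI | agentxai/agents/synthesizer.py | _normalise_option_analysis
-- ===== SOURCE A (Python) =====
-- from typing import Any, Dict, List
--
-- _VALID_VERDICTS: tuple = ("correct", "incorrect", "partial")
--
-- def _normalise_letter(value: Any) -> str:
--     """Single uppercase A-Z letter, or empty string if value is unusable."""
--     if value is None:
--         return ""
--     s = str(value).strip().upper()
--     if len(s) == 1 and "A" <= s <= "Z":
--         return s
--     return ""
--
-- def _normalise_verdict(value: Any) -> str:
--     """One of `correct` / `incorrect` / `partial`; else empty."""
--     s = str(value or "").strip().lower()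
--     return s if s in _VALID_VERDICTS else ""
--
-- def _normalise_option_analysis(raw: Any) -> List[Dict[str, Any]]:
--     """
--     Coerce option_analysis into a list of well-formed entries.
--
--     Each entry is `{letter, text, verdict, reason}`. Bad entries are
--     silently dropped rather than blocking the whole record — older
--     responses that omit option_analysis entirely simply yield [].
--     """
--     if not isinstance(raw, list):
--         return []
--     out: List[Dict[str, Any]] = []
--     seen_letters: set = set()
--     for item in raw:
--         if not isinstance(item, dict):
--             continue
--         letter = _normalise_letter(item.get("letter"))
--         if not letter or letter in seen_letters:
--             continue
--         text = str(item.get("text") or "").strip()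
--         verdict = _normalise_verdict(item.get("verdict"))
--         reason = str(item.get("reason") or "").strip()
--         seen_letters.add(letter)
--         out.append({
--             "letter":  letter,
--             "text":    text,
--             "verdict": verdict,
--             "reason":  reason,
--         })
--     out.sort(key=lambda x: x["letter"])
--     return out
-- ===== SOURCE B (Python) =====
-- from typing import Any, Dict, List
--
-- _VALID_VERDICTS: tuple = ("correct", "incorrect", "partial")
--
-- def _normalise_letter(value: Any) -> str:
--     if value is None:
--         return ""
--     s = str(value).strip().upper()
--     if len(s) == 1 and "A" <= s <= "Z":
--         return s
--     return ""
--
-- def _normalise_verdict(value: Any) -> str: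
--     s = str(value or "").strip().lower()
--     return s if s in _VALID_VERDICTS else ""
--
-- def _normalise_option_analysis(raw: Any) -> List[Dict[str, Any]]:
--     """Collect all valid entries, stable-sort by letter, then keep the first
--     entry of each equal-letter run in one adjacency pass (no seen-set)."""
--     if not isinstance(raw, list):
--         return []
--     entries: List[Dict[str, Any]] = []
--     for item in raw:
--         if not isinstance(item, dict):
--             continue
--         letter = _normalise_letter(item.get("letter"))
--         if letter:
--             entries.append({
--                 "letter":  letter,
--                 "text":    str(item.get("text") or "").strip(),
--                 "verdict": _normalise_verdict(item.get("verdict")),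
--                 "reason":  str(item.get("reason") or "").strip(),
--             })
--     entries.sort(key=lambda x: x["letter"])
--     result: List[Dict[str, Any]] = []
--     for e in entries:
--         if not result or result[-1]["letter"] != e["letter"]:
--             result.append(e)
--     return result
-- ===== Notes on version B (the rewrite author's own statement) =====
-- stated objective: alternative
-- what changed: B drops the seen-letters set entirely: it collects every valid normalized entry in input order, stable-sorts by letter, and dedups equal-letter runs in one adjacency pass (stability keeps the first occurrence, matching A).
import Mathlib
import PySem

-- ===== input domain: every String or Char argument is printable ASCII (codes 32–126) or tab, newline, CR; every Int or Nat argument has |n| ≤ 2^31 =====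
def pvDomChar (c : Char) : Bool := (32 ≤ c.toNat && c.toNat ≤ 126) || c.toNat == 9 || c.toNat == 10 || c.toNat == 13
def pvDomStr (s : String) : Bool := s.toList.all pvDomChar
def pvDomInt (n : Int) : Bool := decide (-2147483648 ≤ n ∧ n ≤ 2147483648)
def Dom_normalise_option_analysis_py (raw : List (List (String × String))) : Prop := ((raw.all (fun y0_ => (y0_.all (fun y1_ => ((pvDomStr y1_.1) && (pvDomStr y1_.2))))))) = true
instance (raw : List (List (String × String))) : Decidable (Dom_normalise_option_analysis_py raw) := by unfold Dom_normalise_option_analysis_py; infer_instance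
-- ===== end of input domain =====

-- B replaces A's seen-letters set by: collect all valid entries, stable-sort by letter,
-- then one adjacency pass keeping the first entry of each equal-letter run (objective: alternative).

-- shared helpers = the module helpers both Pythons use
-- dict.get(k): first match in the association list
def pvGet (item : List (String × String)) (key : String) : Option String :=
  (item.find? (fun p => p.1 == key)).map (·.2)

def normalise_letter (value : Option String) : String :=
  match value with
  | none => ""
  | some v =>
    let s := PySem.Str.upper (PySem.Str.strip v)
    if PySem.Str.len s = 1 ∧ ("A" : String) ≤ s ∧ s ≤ "Z" then s else ""

def normalise_verdict (value : Option String) : String :=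
  let s := PySem.Str.lower (PySem.Str.strip (value.getD ""))
  if s = "correct" ∨ s = "incorrect" ∨ s = "partial" then s else ""

-- the {letter, text, verdict, reason} dict both Pythons build
def pvEntry (letter : String) (item : List (String × String)) : List (String × String) :=
  [("letter", letter),
   ("text", PySem.Str.strip ((pvGet item "text").getD "")),
   ("verdict", normalise_verdict (pvGet item "verdict")),
   ("reason", PySem.Str.strip ((pvGet item "reason").getD ""))]

-- sort key lambda x: x["letter"] (always present on built entries)
def kf (e : List (String × String)) : String := (pvGet e "letter").getD ""

-- ===== PORT A =====
-- A's loop body: skip non-letters and seen letters, else append entry and record letter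
def pvAStep (st : List (List (String × String)) × PySem.Set String)
    (item : List (String × String)) : List (List (String × String)) × PySem.Set String :=
  let letter := normalise_letter (pvGet item "letter")
  if letter = "" ∨ st.2.contains letter then st
  else (st.1 ++ [pvEntry letter item], st.2.add letter)

def normalise_option_analysis_py (raw : List (List (String × String))) : List (List (String × String)) :=
  let st := raw.foldl pvAStep ([], PySem.Set.empty)
  PySem.List.sorted st.1 kf

-- ===== PORT B =====
-- B's collection body: append every valid entry (no seen set)
def pvBStep (acc : List (List (String × String)))
    (item : List (String × String)) : List (List (String × String)) :=
  let letter := normalise_letter (pvGet item "letter")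
  if letter = "" then acc else acc ++ [pvEntry letter item]

-- B's adjacency-dedup body: keep e iff result is empty or the last kept letter differs
def pvDStep (res : List (List (String × String)))
    (e : List (String × String)) : List (List (String × String)) :=
  match res.getLast? with
  | none => res ++ [e]
  | some p => if kf p ≠ kf e then res ++ [e] else res

def normalise_option_analysis_py_alt (raw : List (List (String × String))) : List (List (String × String)) :=
  let entries := raw.foldl pvBStep []
  let es := PySem.List.sorted entries kf
  es.foldl pvDStep []

-- ===== PRECONDITION & SPEC =====
def Spec_normalise_option_analysis_py (raw : List (List (String × String))) (out : List (List (String × String))) : Prop := out = normalise_option_analysis_py_alt raw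
instance (raw : List (List (String × String))) (out : List (List (String × String))) : Decidable (Spec_normalise_option_analysis_py raw out) := by unfold Spec_normalise_option_analysis_py; infer_instance

-- ===== CLAIM (what is proved, stated in full; the proofs are below) =====
def Claim_equal_normalise_option_analysis_py : Prop := ∀ (raw : List (List (String × String))), Dom_normalise_option_analysis_py raw → Spec_normalise_option_analysis_py raw (normalise_option_analysis_py raw)

-- ===== LEMMAS AND PROOFS =====

-- proof-side vocabulary
-- all valid normalized entries, in input order
def centries (items : List (List (String × String))) : List (List (String × String)) :=
  items.filterMap (fun it =>
    let l := normalise_letter (pvGet it "letter")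
    if l = "" then none else some (pvEntry l it))

-- first-occurrence-per-letter filter with an explicit seen list (A's loop)
def ffA : List (List (String × String)) → List String → List (List (String × String))
  | [], _ => []
  | e :: t, seen => if kf e ∈ seen then ffA t seen else e :: ffA t (kf e :: seen)

-- adjacency dedup against the last kept entry (B's final pass)
def dd : List (String × String) → List (List (String × String)) → List (List (String × String))
  | _, [] => []
  | p, b :: t => if kf b = kf p then dd p t else b :: dd b t

def ddTop : List (List (String × String)) → List (List (String × String))
  | [] => []
  | a :: t => a :: dd a t

lemma kf_entry (l : String) (it : List (String × String)) : kf (pvEntry l it) = l := by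
  simp [kf, pvEntry, pvGet]

lemma insertBy_nil {α : Type} (before : α → α → Bool) (x : α) :
    PySem.List.insertBy before x [] = [x] := rfl

lemma insertBy_cons {α : Type} (before : α → α → Bool) (x y : α) (ys : List α) :
    PySem.List.insertBy before x (y :: ys) =
      if before x y then x :: y :: ys else y :: PySem.List.insertBy before x ys := rfl

lemma sorted_concat (xs : List (List (String × String))) (x : List (String × String)) :
    PySem.List.sorted (xs ++ [x]) kf =
      PySem.List.insertBy (fun a b => decide (kf a < kf b)) x (PySem.List.sorted xs kf) := by
  rw [PySem.List.sorted_eq_foldl_insertBy, PySem.List.sorted_eq_foldl_insertBy, List.foldl_append]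
  rfl

lemma Aloop_eq (items : List (List (String × String))) :
    ∀ (out : List (List (String × String))) (seen : PySem.Set String) (sl : List String),
    (∀ l, seen.contains l = true ↔ l ∈ sl) →
    (items.foldl pvAStep (out, seen)).1 = out ++ ffA (centries items) sl := by
  induction items with
  | nil => intro out seen sl _; simp [centries, ffA]
  | cons it t ih =>
    intro out seen sl h
    rw [List.foldl_cons]
    by_cases hl : normalise_letter (pvGet it "letter") = ""
    · rw [show pvAStep (out, seen) it = (out, seen) by simp [pvAStep, hl]]
      rw [ih out seen sl h]
      simp [centries, hl]
    · by_cases hc : seen.contains (normalise_letter (pvGet it "letter")) = true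
      · rw [show pvAStep (out, seen) it = (out, seen) by
          simp only [pvAStep, hl, hc]
          simp]
        rw [ih out seen sl h]
        have hmem : normalise_letter (pvGet it "letter") ∈ sl := (h _).mp hc
        simp [centries, hl, ffA, kf_entry, hmem]
      · rw [show pvAStep (out, seen) it =
            (out ++ [pvEntry (normalise_letter (pvGet it "letter")) it],
             seen.add (normalise_letter (pvGet it "letter"))) by
          simp [pvAStep, hl]
          exact fun hm => hc ((PySem.Set.contains_iff seen _).mpr hm)]
        have hnm : normalise_letter (pvGet it "letter") ∉ sl := fun hm => hc ((h _).mpr hm)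
        have h' : ∀ l, (seen.add (normalise_letter (pvGet it "letter"))).contains l = true ↔
            l ∈ normalise_letter (pvGet it "letter") :: sl := by
          intro l
          rw [PySem.Set.contains_iff, PySem.Set.mem_add, ← PySem.Set.contains_iff, h l]
          simp [List.mem_cons]
          tauto
        rw [ih _ _ _ h']
        simp [centries, hl, ffA, kf_entry, hnm]

lemma Bcollect_eq (items : List (List (String × String))) :
    ∀ (acc : List (List (String × String))),
    items.foldl pvBStep acc = acc ++ centries items := by
  induction items with
  | nil => intro acc; simp [centries]
  | cons it t ih =>
    intro acc
    rw [List.foldl_cons]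
    by_cases hl : normalise_letter (pvGet it "letter") = ""
    · rw [show pvBStep acc it = acc by simp [pvBStep, hl]]
      rw [ih acc]
      simp [centries, hl]
    · rw [show pvBStep acc it = acc ++ [pvEntry (normalise_letter (pvGet it "letter")) it] by
        simp [pvBStep, hl]]
      rw [ih _]
      simp [centries, hl]

-- the dedup foldl computes ddTop
lemma Bdedup_go (t : List (List (String × String))) :
    ∀ (res : List (List (String × String))) (a : List (String × String)),
    t.foldl pvDStep (res ++ [a]) = res ++ a :: dd a t := by
  induction t with
  | nil => intro res a; simp [dd]
  | cons b t ih =>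
    intro res a
    rw [List.foldl_cons]
    by_cases hb : kf b = kf a
    · rw [show pvDStep (res ++ [a]) b = res ++ [a] by
        simp [pvDStep, List.getLast?_concat, hb]]
      rw [ih res a, dd, if_pos hb]
    · rw [show pvDStep (res ++ [a]) b = (res ++ [a]) ++ [b] by
        simp only [pvDStep, List.getLast?_concat]
        rw [if_pos (fun h => hb h.symm)]]
      rw [ih (res ++ [a]) b, dd, if_neg hb]
      simp

lemma Bdedup_eq (s : List (List (String × String))) :
    s.foldl pvDStep [] = ddTop s := by
  cases s with
  | nil => rfl
  | cons a t =>
    rw [List.foldl_cons, show pvDStep [] a = [] ++ [a] by simp [pvDStep]]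
    rw [Bdedup_go t [] a]
    simp [ddTop]

-- key lemma: dedup-after-insert on a sorted tail
lemma dd_ins (x : List (String × String)) :
    ∀ (t : List (List (String × String))) (p : List (String × String)),
    t.Pairwise (fun a b => kf a ≤ kf b) → (∀ z ∈ t, kf p ≤ kf z) → kf p ≤ kf x →
    dd p (PySem.List.insertBy (fun a b => decide (kf a < kf b)) x t) =
      if kf x = kf p ∨ kf x ∈ t.map kf then dd p t
      else PySem.List.insertBy (fun a b => decide (kf a < kf b)) x (dd p t) := by
  intro t
  induction t with
  | nil =>
    intro p _ _ _
    by_cases hxp : kf x = kf p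
    · simp [insertBy_nil, dd, hxp]
    · simp [insertBy_nil, dd, hxp]
  | cons z u ih =>
    intro p hpw hge hpx
    have hzu : ∀ w ∈ u, kf z ≤ kf w := fun w hw => (List.pairwise_cons.mp hpw).1 w hw
    have hpwu : u.Pairwise (fun a b => kf a ≤ kf b) := (List.pairwise_cons.mp hpw).2
    have hpz : kf p ≤ kf z := hge z (List.mem_cons_self)
    have hpu : ∀ w ∈ u, kf p ≤ kf w := fun w hw => le_trans hpz (hzu w hw)
    rw [insertBy_cons]
    by_cases hxz : kf x < kf z
    · -- x goes in front of z: no element of z :: u can share x's key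
      have hnod : kf x ∉ (z :: u).map kf := by
        intro hm
        rcases List.mem_map.mp hm with ⟨w, hw, hkw⟩
        rcases List.mem_cons.mp hw with h1 | h1
        · exact (ne_of_lt hxz) (h1 ▸ hkw).symm
        · exact absurd (hkw ▸ hzu w h1) (not_le.mpr hxz)
      rw [if_pos (by simpa using hxz)]
      by_cases hxp : kf x = kf p
      · rw [dd, if_pos hxp, if_pos (Or.inl hxp)]
      · rw [if_neg (by tauto), dd, if_neg hxp, dd, if_neg (ne_of_gt hxz)]
        have hzp : kf z ≠ kf p := by
          intro h
          exact absurd hpx (not_le.mpr (h ▸ hxz))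
        rw [dd, if_neg hzp, insertBy_cons, if_pos (by simpa using hxz)]
    · -- z stays in front
      have hzx : kf z ≤ kf x := not_lt.mp hxz
      rw [if_neg (by simpa using hxz), dd]
      by_cases hzp : kf z = kf p
      · rw [if_pos hzp, dd, if_pos hzp]
        rw [ih p hpwu hpu hpx]
        by_cases hcond : kf x = kf p ∨ kf x ∈ u.map kf
        · rw [if_pos hcond, if_pos (by
            simp only [List.map_cons, List.mem_cons]
            tauto)]
        · rw [if_neg hcond, if_neg (by
            push_neg at hcond ⊢
            refine ⟨hcond.1, ?_⟩
            simp only [List.map_cons, List.mem_cons]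
            push_neg
            exact ⟨fun h => hcond.1 (h.trans hzp), hcond.2⟩)]
      · rw [if_neg hzp, dd, if_neg hzp]
        rw [ih z hpwu hzu hzx]
        by_cases hcond : kf x = kf z ∨ kf x ∈ u.map kf
        · rw [if_pos hcond, if_pos (by
            simp only [List.map_cons, List.mem_cons]
            tauto)]
        · rw [if_neg hcond, if_neg (by
            push_neg at hcond ⊢
            refine ⟨?_, ?_⟩
            · intro h
              exact hcond.1 (le_antisymm (h ▸ hpz) hzx ▸ le_antisymm hzx (h ▸ hpz) ▸ rfl)
            · simp only [List.map_cons, List.mem_cons]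
              push_neg
              exact ⟨hcond.1, hcond.2⟩)]
          rw [insertBy_cons, if_neg (by simpa using hxz)]

lemma ddTop_ins (x : List (String × String)) (s : List (List (String × String)))
    (hs : s.Pairwise (fun a b => kf a ≤ kf b)) :
    ddTop (PySem.List.insertBy (fun a b => decide (kf a < kf b)) x s) =
      if kf x ∈ s.map kf then ddTop s
      else PySem.List.insertBy (fun a b => decide (kf a < kf b)) x (ddTop s) := by
  cases s with
  | nil => simp [insertBy_nil, ddTop, dd]
  | cons y t =>
    have hyt : ∀ w ∈ t, kf y ≤ kf w := fun w hw => (List.pairwise_cons.mp hs).1 w hw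
    have hpt : t.Pairwise (fun a b => kf a ≤ kf b) := (List.pairwise_cons.mp hs).2
    rw [insertBy_cons]
    by_cases hxy : kf x < kf y
    · have hnm : kf x ∉ (y :: t).map kf := by
        intro hm
        rcases List.mem_map.mp hm with ⟨w, hw, hkw⟩
        rcases List.mem_cons.mp hw with h1 | h1
        · exact (ne_of_lt hxy) (h1 ▸ hkw).symm
        · exact absurd (hkw ▸ hyt w h1) (not_le.mpr hxy)
      rw [if_pos (by simpa using hxy), if_neg hnm]
      rw [ddTop, ddTop, dd, if_neg (ne_of_gt hxy), insertBy_cons, if_pos (by simpa using hxy)]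
    · have hyx : kf y ≤ kf x := not_lt.mp hxy
      rw [if_neg (by simpa using hxy), ddTop, ddTop]
      rw [dd_ins x t y hpt hyt hyx]
      by_cases hcond : kf x = kf y ∨ kf x ∈ t.map kf
      · rw [if_pos hcond, if_pos (by simp only [List.map_cons, List.mem_cons]; tauto)]
      · rw [if_neg hcond, if_neg (by
          simp only [List.map_cons, List.mem_cons]
          push_neg at hcond ⊢
          exact hcond)]
        rw [insertBy_cons, if_neg (by simpa using hxy)]

lemma ffA_append : ∀ (es : List (List (String × String))) (seen : List String)
    (x : List (String × String)),
    ffA (es ++ [x]) seen =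
      ffA es seen ++ (if kf x ∈ seen ∨ kf x ∈ es.map kf then [] else [x]) := by
  intro es
  induction es with
  | nil =>
    intro seen x
    by_cases h : kf x ∈ seen <;> simp [ffA, h]
  | cons e t ih =>
    intro seen x
    rw [List.cons_append, ffA, ffA]
    by_cases he : kf e ∈ seen
    · rw [if_pos he, if_pos he, ih seen x]
      congr 1
      by_cases hx : kf x ∈ seen ∨ kf x ∈ t.map kf
      · rw [if_pos hx, if_pos (by
          simp only [List.map_cons, List.mem_cons] at hx ⊢; tauto)]
      · rw [if_neg hx, if_neg (by
          simp only [List.map_cons, List.mem_cons] at hx ⊢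
          push_neg at hx ⊢
          exact ⟨hx.1, fun h => absurd (h ▸ he) hx.1, hx.2⟩)]
    · rw [if_neg he, if_neg he, ih (kf e :: seen) x, List.cons_append]
      congr 2
      by_cases hx : kf x ∈ (kf e :: seen) ∨ kf x ∈ t.map kf
      · rw [if_pos hx, if_pos (by
          simp only [List.mem_cons, List.map_cons] at hx ⊢; tauto)]
      · rw [if_neg hx, if_neg (by
          simp only [List.mem_cons, List.map_cons] at hx ⊢
          push_neg at hx ⊢
          exact ⟨hx.1.2, hx.1.1, hx.2⟩)]

lemma main_eq : ∀ (es : List (List (String × String))),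
    PySem.List.sorted (ffA es []) kf = ddTop (PySem.List.sorted es kf) := by
  intro es
  induction es using List.reverseRecOn with
  | nil => simp [PySem.List.sorted_eq_foldl_insertBy, ffA, ddTop]
  | append_singleton es x ih =>
    rw [sorted_concat, ffA_append]
    rw [ddTop_ins x (PySem.List.sorted es kf) (PySem.List.sorted_pairwise es kf)]
    have hmem : kf x ∈ (PySem.List.sorted es kf).map kf ↔ kf x ∈ es.map kf := by
      constructor <;> intro h <;> rcases List.mem_map.mp h with ⟨w, hw, hkw⟩
      · exact List.mem_map.mpr ⟨w, (PySem.List.mem_sorted es kf false w).mp hw, hkw⟩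
      · exact List.mem_map.mpr ⟨w, (PySem.List.mem_sorted es kf false w).mpr hw, hkw⟩
    by_cases hx : kf x ∈ es.map kf
    · rw [if_pos (by simp [hx]), if_pos (hmem.mpr hx)]
      simpa using ih
    · rw [if_neg (by simp [hx]), if_neg (fun h => hx (hmem.mp h))]
      rw [sorted_concat, ih]

-- ===== VERDICT (by name: the statement is the Claim_ definition above) =====
theorem normalise_option_analysis_py_spec : Claim_equal_normalise_option_analysis_py := by
  intro raw _
  unfold Spec_normalise_option_analysis_py
  unfold normalise_option_analysis_py normalise_option_analysis_py_alt
  show PySem.List.sorted (List.foldl pvAStep ([], PySem.Set.empty) raw).1 kf =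
    List.foldl pvDStep [] (PySem.List.sorted (List.foldl pvBStep [] raw) kf)
  rw [Aloop_eq raw [] PySem.Set.empty []
    (by intro l; simp [PySem.Set.empty])]
  rw [Bcollect_eq raw [], Bdedup_eq]
  simpa using main_eq (centries raw)
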